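-- pv_equiv track=rewrite | github.com/LoanpyDataHub/loanpy | src/loanpy/apply.py | tuples2editops
-- ===== SOURCE A (Python) =====
-- def tuples2editops(op_list, s1, s2):
--     """
--     Called by loanpy.helpers.editops. \
-- The path how string1 is converted to string2 is given in form of tuples \
-- that contain the x and y coordinates of every step through the matrix \
-- shaped graph. \
-- This function converts those numerical instructions to human readable ones. \
-- The x values stand for horizontal movement, y values for vertical ones. \
-- Vertical movement means deletion, horizontal means insertion. \
-- Diagonal means the value is kept. \
-- Moving horizontally and vertically after each other means \
-- substitution.
--
--     :param op_list: The numeric list of edit operations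
--     :type op_list: list of tuples of 2 int
--
--     :param s1: The first of two strings to be compared to each other
--     :type s1: str
--
--     :param s2: The second of two strings to be compared to each other
--     :type s2: str
--
--     :returns: list of human readable edit operations
--     :rtype: list of strings
--
--     :Example:
--
--     >>> from loanpy.helpers import tuples2editops
--     >>> tuples2editops([(0, 0), (0, 1), (1, 1), (2, 2)], "ló", "hó")
--     ['substitute l by h', 'keep ó']
--     >>>  # What happened under the hood:
--     # (0, 0), (0, 1): move 1 vertically = 1 deletion
--     # (0, 1), (1, 1): move 1 horizontally = 1 insertion
--     # insertion and deletion after each other equals substitution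
--     # (1, 1), (2, 2): move 1 diagonally = keep the sound
--
--     """
--     s1, s2 = "#" + s1, "#" + s2
--     out = []
--     for i in range(1, len(op_list)):
--         # where does the arrow point?
--         direction = [op_list[i][0] - op_list[i - 1][0], op_list[i][1] - op_list[i - 1][1]]
--         if direction == [1, 1]:  # if diagonal
--             out.append(f"keep {s1[op_list[i][1]]}")
--         elif direction == [0, 1]:  # if horizontal
--             out.append(f"delete {s1[op_list[i][1]]}")
--         elif direction == [1, 0]:  # if vertical
--             out.append(f"insert {s2[op_list[i][0]]}")
--
--     return substitute_operations(out)
--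
-- def substitute_operations(operations):
--     i = 0
--     while i < len(operations) - 1:
--         if operations[i].startswith('delete ') and operations[i+1].startswith('insert '):
--             x = operations[i][7:]
--             y = operations[i+1][7:]
--             operations[i:i+2] = [f'substitute {x} by {y}']
--         elif operations[i].startswith('insert ') and operations[i+1].startswith('delete '):
--             x = operations[i][7:]
--             y = operations[i+1][7:]
--             operations[i:i+2] = [f'substitute {y} by {x}']
--         else:
--             i += 1
--     return operations
-- ===== SOURCE B (Python) =====
-- def _push(res, tok):
--     # append tok, then merge the last two ops if they are delete+insert (either order)
--     res.append(tok)
--     if len(res) >= 2: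
--         a, b = res[-2], res[-1]
--         if a.startswith('delete ') and b.startswith('insert '):
--             res[-2:] = [f"substitute {a[7:]} by {b[7:]}"]
--         elif a.startswith('insert ') and b.startswith('delete '):
--             res[-2:] = [f"substitute {b[7:]} by {a[7:]}"]
--
--
-- def tuples2editops(op_list, s1, s2):
--     s1, s2 = "#" + s1, "#" + s2
--     res = []
--     for i in range(1, len(op_list)):
--         cur, prev = op_list[i], op_list[i - 1]
--         dx, dy = cur[0] - prev[0], cur[1] - prev[1]
--         if (dx, dy) == (1, 1):
--             _push(res, f"keep {s1[cur[1]]}")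
--         elif (dx, dy) == (0, 1):
--             _push(res, f"delete {s1[cur[1]]}")
--         elif (dx, dy) == (1, 0):
--             _push(res, f"insert {s2[cur[0]]}")
--     return res
-- ===== Notes on version B (the rewrite author's own statement) =====
-- stated objective: alternative
-- what changed: A emits all ops and then runs a second while-loop (substitute_operations) that splices delete+insert pairs into 'substitute' ops at a moving index; B is a single pass that pushes each emitted op with a lookback merging a trailing delete/insert pair in place, with no second pass.
import Mathlib
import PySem

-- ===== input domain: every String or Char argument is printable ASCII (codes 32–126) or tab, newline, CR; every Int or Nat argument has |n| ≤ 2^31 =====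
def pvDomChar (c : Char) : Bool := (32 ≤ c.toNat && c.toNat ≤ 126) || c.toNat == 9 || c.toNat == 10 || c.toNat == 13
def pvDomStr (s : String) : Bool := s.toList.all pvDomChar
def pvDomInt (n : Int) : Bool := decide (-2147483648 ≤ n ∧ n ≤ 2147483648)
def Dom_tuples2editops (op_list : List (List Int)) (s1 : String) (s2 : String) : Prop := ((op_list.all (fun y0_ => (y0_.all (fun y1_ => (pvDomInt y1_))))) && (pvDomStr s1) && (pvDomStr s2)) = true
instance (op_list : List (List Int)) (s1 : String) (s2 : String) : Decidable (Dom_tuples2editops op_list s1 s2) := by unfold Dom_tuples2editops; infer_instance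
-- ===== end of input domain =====

-- B fuses A's second merging pass (substitute_operations, a while loop splicing the list at a moving
-- index) into the emission loop: each emitted op is pushed with a lookback that merges a trailing
-- delete/insert pair in place. Objective: alternative (single pass, no separate splicing pass).
-- Strings are handled as List Char (PySem.Chars level) and converted to String at the very end — exact.

-- the string literals used by both programs, as char lists
def kTag : List Char := ['k','e','e','p',' ']                          -- "keep "
def dTag : List Char := ['d','e','l','e','t','e',' ']                  -- "delete "
def iTag : List Char := ['i','n','s','e','r','t',' ']                  -- "insert "
def sTag : List Char := ['s','u','b','s','t','i','t','u','t','e',' ']  -- "substitute "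
def byTag : List Char := [' ','b','y',' ']                             -- " by "

-- ===== PORT A =====
-- A's while-loop merging pass (substitute_operations), literally: splice at index i, re-check at i.
-- fuel only bounds the number of loop steps (2*len(ops)+1 at the call site is never exhausted).
def subOpsA (fuel : Nat) (ops : List (List Char)) (i : Nat) : List (List Char) :=
  match fuel with
  | 0 => ops
  | fuel + 1 =>
    if i + 1 < ops.length then
      let a := ops.getD i []
      let b := ops.getD (i + 1) []
      if PySem.Chars.startswith a dTag && PySem.Chars.startswith b iTag then
        subOpsA fuel (ops.take i ++ (sTag ++ PySem.Chars.slice a (some 7) none ++ byTag ++ PySem.Chars.slice b (some 7) none) :: ops.drop (i + 2)) i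
      else if PySem.Chars.startswith a iTag && PySem.Chars.startswith b dTag then
        subOpsA fuel (ops.take i ++ (sTag ++ PySem.Chars.slice b (some 7) none ++ byTag ++ PySem.Chars.slice a (some 7) none) :: ops.drop (i + 2)) i
      else subOpsA fuel ops (i + 1)
    else ops

-- the body of A's emission loop (over i in range(1, len(op_list)))
def stepA (op_list : List (List Int)) (t1 t2 : List Char) (out : List (List Char)) (i : Int) : List (List Char) :=
  let direction := [PySem.List.pyGetD (PySem.List.pyGetD op_list i []) 0 0 -
                      PySem.List.pyGetD (PySem.List.pyGetD op_list (i - 1) []) 0 0,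
                    PySem.List.pyGetD (PySem.List.pyGetD op_list i []) 1 0 -
                      PySem.List.pyGetD (PySem.List.pyGetD op_list (i - 1) []) 1 0]
  if direction = [1, 1] then
    out ++ [kTag ++ [PySem.List.pyGetD t1 (PySem.List.pyGetD (PySem.List.pyGetD op_list i []) 1 0) '?']]
  else if direction = [0, 1] then
    out ++ [dTag ++ [PySem.List.pyGetD t1 (PySem.List.pyGetD (PySem.List.pyGetD op_list i []) 1 0) '?']]
  else if direction = [1, 0] then
    out ++ [iTag ++ [PySem.List.pyGetD t2 (PySem.List.pyGetD (PySem.List.pyGetD op_list i []) 0 0) '?']]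
  else out

def tuples2editops (op_list : List (List Int)) (s1 : String) (s2 : String) : List String :=
  let t1 := '#' :: s1.toList
  let t2 := '#' :: s2.toList
  let out := (PySem.List.pyRange 1 op_list.length 1).foldl (stepA op_list t1 t2) []
  (subOpsA (2 * out.length + 1) out 0).map String.ofList

-- ===== PORT B =====
-- Source B's _push: append tok, then merge the last two ops if they are delete+insert (either order)
def pushOp (res : List (List Char)) (tok : List Char) : List (List Char) :=
  let res' := res ++ [tok]
  if 2 ≤ res'.length then
    let a := PySem.List.pyGetD res' (-2) []
    let b := PySem.List.pyGetD res' (-1) []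
    if PySem.Chars.startswith a dTag && PySem.Chars.startswith b iTag then
      PySem.List.slice res' none (some (-2)) ++ [sTag ++ PySem.Chars.slice a (some 7) none ++ byTag ++ PySem.Chars.slice b (some 7) none]
    else if PySem.Chars.startswith a iTag && PySem.Chars.startswith b dTag then
      PySem.List.slice res' none (some (-2)) ++ [sTag ++ PySem.Chars.slice b (some 7) none ++ byTag ++ PySem.Chars.slice a (some 7) none]
    else res'
  else res'

-- the body of Source B's single loop
def stepB (op_list : List (List Int)) (t1 t2 : List Char) (res : List (List Char)) (i : Int) : List (List Char) :=
  let cur := PySem.List.pyGetD op_list i []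
  let prev := PySem.List.pyGetD op_list (i - 1) []
  let dx := PySem.List.pyGetD cur 0 0 - PySem.List.pyGetD prev 0 0
  let dy := PySem.List.pyGetD cur 1 0 - PySem.List.pyGetD prev 1 0
  if (dx, dy) = ((1 : Int), (1 : Int)) then
    pushOp res (kTag ++ [PySem.List.pyGetD t1 (PySem.List.pyGetD cur 1 0) '?'])
  else if (dx, dy) = ((0 : Int), (1 : Int)) then
    pushOp res (dTag ++ [PySem.List.pyGetD t1 (PySem.List.pyGetD cur 1 0) '?'])
  else if (dx, dy) = ((1 : Int), (0 : Int)) then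
    pushOp res (iTag ++ [PySem.List.pyGetD t2 (PySem.List.pyGetD cur 0 0) '?'])
  else res

def tuples2editops_alt (op_list : List (List Int)) (s1 : String) (s2 : String) : List String :=
  let t1 := '#' :: s1.toList
  let t2 := '#' :: s2.toList
  ((PySem.List.pyRange 1 op_list.length 1).foldl (stepB op_list t1 t2) []).map String.ofList

-- ===== PRECONDITION & SPEC =====
-- Pre_ excludes exactly the inputs on which Python A raises IndexError: an op tuple shorter than 2,
-- or (in a matched direction branch) a string index outside Python's negative-wrap range.
def Pre_tuples2editops (op_list : List (List Int)) (s1 : String) (s2 : String) : Prop :=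
  ∀ k < op_list.length - 1,
    let cur := op_list.getD (k + 1) []
    let prev := op_list.getD k []
    2 ≤ cur.length ∧ 2 ≤ prev.length ∧
    (let dx := cur.getD 0 0 - prev.getD 0 0
     let dy := cur.getD 1 0 - prev.getD 1 0
     ((dx = 1 ∧ dy = 1) ∨ (dx = 0 ∧ dy = 1) →
        -((s1.length : Int) + 1) ≤ cur.getD 1 0 ∧ cur.getD 1 0 < (s1.length : Int) + 1) ∧
     (dx = 1 ∧ dy = 0 →
        -((s2.length : Int) + 1) ≤ cur.getD 0 0 ∧ cur.getD 0 0 < (s2.length : Int) + 1))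

instance (op_list : List (List Int)) (s1 : String) (s2 : String) : Decidable (Pre_tuples2editops op_list s1 s2) := by
  unfold Pre_tuples2editops; infer_instance

def pvWitness_tuples2editops : List (List Int) × String × String :=
  ([[0, 0], [0, 1], [1, 1], [2, 2]], "lo", "ho")

def Spec_tuples2editops (op_list : List (List Int)) (s1 : String) (s2 : String) (out : List String) : Prop := out = tuples2editops_alt op_list s1 s2
instance (op_list : List (List Int)) (s1 : String) (s2 : String) (out : List String) : Decidable (Spec_tuples2editops op_list s1 s2 out) := by unfold Spec_tuples2editops; infer_instance

-- ===== CLAIM (what is proved, stated in full; the proofs are below) =====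
def Claim_equal_tuples2editops : Prop := ∀ (op_list : List (List Int)) (s1 : String) (s2 : String), Dom_tuples2editops op_list s1 s2 → Pre_tuples2editops op_list s1 s2 → Spec_tuples2editops op_list s1 s2 (tuples2editops op_list s1 s2)

-- ===== LEMMAS AND PROOFS =====

-- the merge tests and merged ops, named for the proofs
def C1 (a b : List Char) : Bool := PySem.Chars.startswith a dTag && PySem.Chars.startswith b iTag
def C2 (a b : List Char) : Bool := PySem.Chars.startswith a iTag && PySem.Chars.startswith b dTag
def m1 (a b : List Char) : List Char := sTag ++ PySem.Chars.slice a (some 7) none ++ byTag ++ PySem.Chars.slice b (some 7) none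
def m2 (a b : List Char) : List Char := sTag ++ PySem.Chars.slice b (some 7) none ++ byTag ++ PySem.Chars.slice a (some 7) none

-- the common mathematical description: a left-to-right merge of adjacent delete/insert pairs
def mergeR : List (List Char) → List (List Char)
  | [] => []
  | [a] => [a]
  | a :: b :: rest =>
    if C1 a b then m1 a b :: mergeR rest
    else if C2 a b then m2 a b :: mergeR rest
    else a :: mergeR (b :: rest)

-- the op emitted by both loop bodies at index i (none = unrecognized direction, nothing emitted)
def tokOf (op_list : List (List Int)) (t1 t2 : List Char) (i : Int) : Option (List Char) :=
  let cur := PySem.List.pyGetD op_list i []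
  let prev := PySem.List.pyGetD op_list (i - 1) []
  let dx := PySem.List.pyGetD cur 0 0 - PySem.List.pyGetD prev 0 0
  let dy := PySem.List.pyGetD cur 1 0 - PySem.List.pyGetD prev 1 0
  if (dx, dy) = ((1 : Int), (1 : Int)) then some (kTag ++ [PySem.List.pyGetD t1 (PySem.List.pyGetD cur 1 0) '?'])
  else if (dx, dy) = ((0 : Int), (1 : Int)) then some (dTag ++ [PySem.List.pyGetD t1 (PySem.List.pyGetD cur 1 0) '?'])
  else if (dx, dy) = ((1 : Int), (0 : Int)) then some (iTag ++ [PySem.List.pyGetD t2 (PySem.List.pyGetD cur 0 0) '?'])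
  else none

-- a substitute op never merges again: it does not start with "delete " or "insert "
theorem sub_not_dTag (r : List Char) : PySem.Chars.startswith (sTag ++ r) dTag = false := by
  simp [PySem.Chars.startswith, sTag, dTag, List.isPrefixOf]

theorem sub_not_iTag (r : List Char) : PySem.Chars.startswith (sTag ++ r) iTag = false := by
  simp [PySem.Chars.startswith, sTag, iTag, List.isPrefixOf]

theorem m1_assoc (a b : List Char) :
    m1 a b = sTag ++ (PySem.Chars.slice a (some 7) none ++ (byTag ++ PySem.Chars.slice b (some 7) none)) := by
  simp [m1]

theorem m2_assoc (a b : List Char) :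
    m2 a b = sTag ++ (PySem.Chars.slice b (some 7) none ++ (byTag ++ PySem.Chars.slice a (some 7) none)) := by
  simp [m2]

theorem m1_not_d (a b : List Char) : PySem.Chars.startswith (m1 a b) dTag = false := by
  rw [m1_assoc]; exact sub_not_dTag _

theorem m1_not_i (a b : List Char) : PySem.Chars.startswith (m1 a b) iTag = false := by
  rw [m1_assoc]; exact sub_not_iTag _

theorem m2_not_d (a b : List Char) : PySem.Chars.startswith (m2 a b) dTag = false := by
  rw [m2_assoc]; exact sub_not_dTag _

theorem m2_not_i (a b : List Char) : PySem.Chars.startswith (m2 a b) iTag = false := by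
  rw [m2_assoc]; exact sub_not_iTag _

theorem mergeR_cons_inert (x : List Char) (rest : List (List Char))
    (hd : PySem.Chars.startswith x dTag = false) (hi : PySem.Chars.startswith x iTag = false) :
    mergeR (x :: rest) = x :: mergeR rest := by
  cases rest with
  | nil => rfl
  | cons c r => simp [mergeR, C1, C2, hd, hi]

theorem pushOp_nil (t : List Char) : pushOp [] t = [t] := by simp [pushOp]

theorem pushOp_append (acc : List (List Char)) (s t : List Char) :
    pushOp (acc ++ [s]) t =
      if C1 s t then acc ++ [m1 s t] else if C2 s t then acc ++ [m2 s t] else acc ++ [s, t] := by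
  have h2 : ((acc ++ [s]) ++ [t]).length = acc.length + 2 := by simp
  have hm2 : PySem.List.pyGetD ((acc ++ [s]) ++ [t]) (-2) [] = s := by
    rw [PySem.List.pyGetD_neg_ofNat _ 2 [] (by omega) (by simp)]
    simp
  have hm1 : PySem.List.pyGetD ((acc ++ [s]) ++ [t]) (-1) [] = t :=
    PySem.List.pyGetD_neg_one_append_singleton _ _ _
  have hsl : PySem.List.slice ((acc ++ [s]) ++ [t]) none (some (-2)) = acc := by
    rw [PySem.List.slice_to_neg_ofNat _ 2 (by omega)]
    simp
  simp only [pushOp, C1, C2, m1, m2, hm2, hm1, hsl, h2]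
  simp

theorem pushOp_append_merge1 (acc : List (List Char)) (s t : List Char) (h : C1 s t = true) :
    pushOp (acc ++ [s]) t = acc ++ [m1 s t] := by rw [pushOp_append]; simp [h]

theorem pushOp_append_merge2 (acc : List (List Char)) (s t : List Char)
    (h1 : C1 s t = false) (h2 : C2 s t = true) :
    pushOp (acc ++ [s]) t = acc ++ [m2 s t] := by rw [pushOp_append]; simp [h1, h2]

theorem pushOp_append_keep (acc : List (List Char)) (s t : List Char)
    (h1 : C1 s t = false) (h2 : C2 s t = false) :
    pushOp (acc ++ [s]) t = (acc ++ [s]) ++ [t] := by rw [pushOp_append]; simp [h1, h2]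

theorem pushOp_single (s t : List Char) : pushOp [s] t = pushOp ([] ++ [s]) t := by simp

-- pushOp only ever touches the last element, so a common prefix factors out
theorem foldl_pushOp_factor (ts : List (List Char)) :
    ∀ (acc : List (List Char)) (s : List Char),
      List.foldl pushOp (acc ++ [s]) ts = acc ++ List.foldl pushOp [s] ts := by
  induction ts with
  | nil => intro acc s; simp
  | cons t ts ih =>
    intro acc s
    rw [List.foldl_cons, List.foldl_cons]
    cases h1 : C1 s t with
    | true =>
      rw [pushOp_append_merge1 _ _ _ h1, pushOp_single, pushOp_append_merge1 _ _ _ h1,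
        List.nil_append, ih]
    | false =>
      cases h2 : C2 s t with
      | true =>
        rw [pushOp_append_merge2 _ _ _ h1 h2, pushOp_single, pushOp_append_merge2 _ _ _ h1 h2,
          List.nil_append, ih]
      | false =>
        rw [pushOp_append_keep _ _ _ h1 h2, pushOp_single, pushOp_append_keep _ _ _ h1 h2,
          List.nil_append, ih]
        rw [show ([s] : List (List Char)) ++ [t] = [s] ++ [t] from rfl, ih]
        simp

-- after a merge, the substituted op is inert: pushing the next op just appends it
theorem foldl_pushOp_inert (x : List Char) (rest : List (List Char))
    (hd : PySem.Chars.startswith x dTag = false) (hi : PySem.Chars.startswith x iTag = false) :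
    List.foldl pushOp [x] rest = x :: List.foldl pushOp [] rest := by
  cases rest with
  | nil => simp
  | cons c r =>
    rw [List.foldl_cons, pushOp_single,
      pushOp_append_keep _ _ _ (by simp [C1, hd]) (by simp [C2, hi]),
      List.nil_append, List.foldl_cons, pushOp_nil,
      show ([x] : List (List Char)) ++ [c] = [x] ++ [c] from rfl, foldl_pushOp_factor]
    simp

-- B's online merging computes the left-to-right pair merge
theorem foldl_pushOp_eq_mergeR : ∀ (n : Nat) (ts : List (List Char)), ts.length ≤ n →
    List.foldl pushOp [] ts = mergeR ts := by
  intro n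
  induction n with
  | zero => intro ts h; rw [List.length_eq_zero_iff.mp (Nat.le_zero.mp h)]; rfl
  | succ n ih =>
    intro ts h
    match ts with
    | [] => rfl
    | [a] => simp [pushOp, mergeR]
    | a :: b :: rest =>
      simp only [List.length_cons] at h
      rw [List.foldl_cons, List.foldl_cons, pushOp_nil, pushOp_single]
      cases h1 : C1 a b with
      | true =>
        rw [pushOp_append_merge1 _ _ _ h1, List.nil_append,
          foldl_pushOp_inert _ _ (m1_not_d a b) (m1_not_i a b),
          ih rest (by omega)]
        simp [mergeR, h1]
      | false =>
        cases h2 : C2 a b with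
        | true =>
          rw [pushOp_append_merge2 _ _ _ h1 h2, List.nil_append,
            foldl_pushOp_inert _ _ (m2_not_d a b) (m2_not_i a b),
            ih rest (by omega)]
          simp [mergeR, h1, h2]
        | false =>
          rw [pushOp_append_keep _ _ _ h1 h2, List.nil_append,
            show ([a] : List (List Char)) ++ [b] = [a] ++ [b] from rfl, foldl_pushOp_factor]
          have hfb : List.foldl pushOp [b] rest = List.foldl pushOp [] (b :: rest) := by
            rw [List.foldl_cons, pushOp_nil]
          rw [hfb, ih (b :: rest) (by simp; omega)]
          simp [mergeR, h1, h2]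

-- A's splicing while-loop computes the same left-to-right pair merge
theorem subOpsA_eq_mergeR : ∀ (n : Nat) (suf : List (List Char)), suf.length ≤ n →
    ∀ (pre : List (List Char)) (fuel : Nat), 2 * suf.length ≤ fuel →
      subOpsA fuel (pre ++ suf) pre.length = pre ++ mergeR suf := by
  intro n
  induction n with
  | zero =>
    intro suf h pre fuel _
    rw [List.length_eq_zero_iff.mp (Nat.le_zero.mp h)]
    cases fuel <;> simp [subOpsA, mergeR]
  | succ n ih =>
    intro suf h pre fuel hfuel
    match suf with
    | [] => cases fuel <;> simp [subOpsA, mergeR]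
    | [a] => cases fuel <;> simp [subOpsA, mergeR]
    | a :: b :: rest =>
      simp only [List.length_cons] at h hfuel
      match fuel, hfuel with
      | f + 1, _ =>
        have hga : (pre ++ a :: b :: rest).getD pre.length [] = a := by
          rw [List.getD_append_right _ _ [] pre.length (le_refl _)]; simp
        have hgb : (pre ++ a :: b :: rest).getD (pre.length + 1) [] = b := by
          rw [List.getD_append_right _ _ [] (pre.length + 1) (by omega)]; simp
        have htake : (pre ++ a :: b :: rest).take pre.length = pre := List.take_left' rfl
        have hdrop : (pre ++ a :: b :: rest).drop (pre.length + 2) = rest := by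
          rw [List.drop_append, List.drop_eq_nil_of_le (by omega)]
          have h2 : pre.length + 2 - pre.length = 2 := by omega
          rw [h2]
          rfl
        rw [subOpsA, if_pos (by simp only [List.length_append, List.length_cons]; omega)]
        simp only [hga, hgb, htake, hdrop]
        cases h1 : C1 a b with
        | true =>
          have h1' := h1; simp only [C1] at h1'
          rw [if_pos h1']
          have := ih (m1 a b :: rest) (by simp; omega) pre f (by simp; omega)
          rw [show (sTag ++ PySem.Chars.slice a (some 7) none ++ byTag ++ PySem.Chars.slice b (some 7) none) = m1 a b from rfl, this,
            mergeR_cons_inert _ _ (m1_not_d a b) (m1_not_i a b)]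
          simp [mergeR, h1]
        | false =>
          have h1' := h1; simp only [C1] at h1'
          rw [if_neg (by simp [h1'])]
          cases h2 : C2 a b with
          | true =>
            have h2' := h2; simp only [C2] at h2'
            rw [if_pos h2']
            have := ih (m2 a b :: rest) (by simp; omega) pre f (by simp; omega)
            rw [show (sTag ++ PySem.Chars.slice b (some 7) none ++ byTag ++ PySem.Chars.slice a (some 7) none) = m2 a b from rfl, this,
              mergeR_cons_inert _ _ (m2_not_d a b) (m2_not_i a b)]
            simp [mergeR, h1, h2]
          | false =>
            have h2' := h2; simp only [C2] at h2'
            rw [if_neg (by simp [h2'])]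
            have := ih (b :: rest) (by simp; omega) (pre ++ [a]) f (by simp; omega)
            rw [show pre.length + 1 = (pre ++ [a]).length by simp,
              show pre ++ a :: b :: rest = (pre ++ [a]) ++ b :: rest by simp, this]
            simp [mergeR, h1, h2]

-- A's emission loop appends exactly the recognized ops
theorem foldl_stepA (op_list : List (List Int)) (t1 t2 : List Char) :
    ∀ (R : List Int) (acc : List (List Char)),
      R.foldl (stepA op_list t1 t2) acc = acc ++ R.filterMap (tokOf op_list t1 t2) := by
  intro R
  induction R with
  | nil => intro acc; simp
  | cons r R ihr =>
    intro acc
    rw [List.foldl_cons, ihr, List.filterMap_cons]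
    simp only [stepA, tokOf]
    split_ifs with ha1 ha2 ha3 <;> simp_all

-- B's loop pushes exactly the recognized ops
theorem foldl_stepB (op_list : List (List Int)) (t1 t2 : List Char) :
    ∀ (R : List Int) (acc : List (List Char)),
      R.foldl (stepB op_list t1 t2) acc = (R.filterMap (tokOf op_list t1 t2)).foldl pushOp acc := by
  intro R
  induction R with
  | nil => intro acc; simp
  | cons r R ihr =>
    intro acc
    rw [List.foldl_cons, ihr, List.filterMap_cons]
    simp only [stepB, tokOf]
    split_ifs with ha1 ha2 ha3 <;> simp_all

-- ===== VERDICT (by name: the statement is the Claim_ definition above) =====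
theorem tuples2editops_spec : Claim_equal_tuples2editops := by
  intro op_list s1 s2 _ _
  simp only [Spec_tuples2editops, tuples2editops, tuples2editops_alt]
  rw [foldl_stepA, foldl_stepB]
  simp only [List.nil_append]
  set ts := (PySem.List.pyRange 1 op_list.length 1).filterMap
      (tokOf op_list ('#' :: s1.toList) ('#' :: s2.toList)) with hts
  have hA : subOpsA (2 * ts.length + 1) ([] ++ ts) ([] : List (List Char)).length = [] ++ mergeR ts :=
    subOpsA_eq_mergeR ts.length ts (le_refl _) [] (2 * ts.length + 1) (by omega)
  simp only [List.nil_append, List.length_nil] at hA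
  rw [hA, foldl_pushOp_eq_mergeR ts.length ts (le_refl _)]
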